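-- pv_equiv track=rewrite | github.com/Phicar/semillero | diego.py | tal
-- ===== SOURCE A (Python) =====
-- X = ["a","aa"]
--
-- def pref(s,x):
-- 	si = True
-- 	if len(x)>len(s):
-- 		return False
-- 	for i in range(len(x)):
-- 		if x[i]!=s[i]:
-- 			return False
-- 	return True
--
-- def tal(s):
-- 	if len(s)==0:
-- 		return 1
-- 	rs = 0
-- 	for x in X:
-- 		if pref(s,x):
-- 			rs=rs+tal(s[len(x):])
-- 	return rs
-- ===== SOURCE B (Python) =====
-- def tal(s):
--     if any(c != 'a' for c in s):
--         return 0
--     a, b = 1, 1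
--     for _ in s:
--         a, b = b, a + b
--     return a
-- ===== Notes on version B (the rewrite author's own statement) =====
-- stated objective: faster
-- what changed: Replaces the exponential branching recursion with a single pass checking that every character is the letter a, followed by an iterative Fibonacci loop over the length; intended as faster (asymptotic): a timing run saw A time out at n=256 where B returned, and B 2.62x faster at the largest size both finished.
import Mathlib
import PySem

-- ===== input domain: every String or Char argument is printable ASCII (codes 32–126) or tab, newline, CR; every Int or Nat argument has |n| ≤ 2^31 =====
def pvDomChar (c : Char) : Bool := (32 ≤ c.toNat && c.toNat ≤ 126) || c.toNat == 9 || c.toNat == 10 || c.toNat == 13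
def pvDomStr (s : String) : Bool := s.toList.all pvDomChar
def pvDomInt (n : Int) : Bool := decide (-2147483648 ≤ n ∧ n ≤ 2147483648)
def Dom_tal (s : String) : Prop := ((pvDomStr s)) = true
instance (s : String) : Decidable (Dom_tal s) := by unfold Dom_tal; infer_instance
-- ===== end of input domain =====

-- B replaces A's branching recursion by one pass checking every character plus an iterative
-- Fibonacci loop; intended as faster (a timing run saw A time out at n=256 where B returned).

-- ===== PORT A =====
-- pref(s, x): the range-loop with early `return False` is the `all` over the index range;
-- indices are in range there (len(x) ≤ len(s)), so getD is exact.
def pref (s x : List Char) : Bool :=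
  if x.length > s.length then false
  else (List.range x.length).all (fun i => x.getD i ' ' == s.getD i ' ')

theorem pref_length {s x : List Char} (h : pref s x = true) : x.length ≤ s.length := by
  unfold pref at h
  by_cases hl : x.length > s.length
  · simp [hl] at h
  · omega

-- tal over the character list; the `for x in X` loop over the module constant X = ["a","aa"]
-- is unrolled into its two iterations (needed for the termination argument);
-- s[len(x):] with a nonnegative in-range start is List.drop.
def tal_list (s : List Char) : Int :=
  if _h : s = [] then 1
  else
    let rs : Int := 0
    let rs := if _h1 : pref s ['a'] = true then rs + tal_list (s.drop 1) else rs
    let rs := if h2 : pref s ['a', 'a'] = true then rs + tal_list (s.drop 2) else rs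
    rs
termination_by s.length
decreasing_by
  · have hs : s.length ≠ 0 := by simpa [List.length_eq_zero_iff] using _h
    simp; omega
  · have h2' := pref_length h2
    simp at h2' ⊢
    omega

def tal (s : String) : Int := tal_list s.toList

-- ===== PORT B =====
-- the `for _ in s: a, b = b, a + b` loop
def fibStep (p : Int × Int) (_ : Char) : Int × Int := (p.2, p.1 + p.2)

def tal_alt (s : String) : Int :=
  if s.toList.all (fun c => c == 'a') then (s.toList.foldl fibStep (1, 1)).1 else 0

-- ===== PRECONDITION & SPEC =====
def Spec_tal (s : String) (out : Int) : Prop := out = tal_alt s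
instance (s : String) (out : Int) : Decidable (Spec_tal s out) := by unfold Spec_tal; infer_instance

-- ===== CLAIM (what is proved, stated in full; the proofs are below) =====
def Claim_equal_tal : Prop := ∀ (s : String), Dom_tal s → Spec_tal s (tal s)

-- ===== LEMMAS AND PROOFS =====

def fibFun (p : Int × Int) : Int × Int := (p.2, p.1 + p.2)

theorem foldl_fibStep (l : List Char) (p : Int × Int) :
    l.foldl fibStep p = fibFun^[l.length] p := by
  induction l generalizing p with
  | nil => simp
  | cons c t ih => simp [List.foldl, ih, Function.iterate_succ_apply, fibStep, fibFun]

-- the value B computes on an all-'a' list of length n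
def altL (l : List Char) : Int :=
  if l.all (fun c => c == 'a') then (fibFun^[l.length] (1, 1)).1 else 0

theorem fib_succ (n : Nat) :
    (fibFun^[n + 1] ((1 : Int), (1 : Int))) =
      ((fibFun^[n] ((1 : Int), (1 : Int))).2,
       (fibFun^[n] ((1 : Int), (1 : Int))).1 + (fibFun^[n] ((1 : Int), (1 : Int))).2) := by
  rw [Function.iterate_succ_apply']; rfl

theorem pref_a (c : Char) (t : List Char) : pref (c :: t) ['a'] = ('a' == c) := by
  cases hbc : ('a' == c) <;> simp [pref, List.range_one, hbc]

theorem pref_aa_one (c : Char) : pref [c] ['a', 'a'] = false := by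
  simp [pref]

theorem pref_aa (c d : Char) (u : List Char) :
    pref (c :: d :: u) ['a', 'a'] = (('a' == c) && ('a' == d)) := by
  cases h1 : ('a' == c) <;> cases h2 : ('a' == d) <;>
    simp [pref, List.range_succ, h1, h2]

theorem key : ∀ n (l : List Char), l.length ≤ n → tal_list l = altL l := by
  intro n
  induction n with
  | zero =>
    intro l hl
    have : l = [] := by cases l <;> simp_all
    subst this
    simp [tal_list, altL]
  | succ n ih =>
    intro l hl
    match l with
    | [] => simp [tal_list, altL]
    | [c] =>
      rw [tal_list]
      by_cases hc : c = 'a'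
      · subst hc
        have h1 : pref ['a'] ['a'] = true := by decide
        simp [h1, pref_aa_one, tal_list, altL, fibFun]
      · have h1 : pref [c] ['a'] = false := by
          rw [pref_a]; simpa using fun h => hc h.symm
        simp [h1, pref_aa_one, altL, hc]
    | c :: d :: u =>
      rw [tal_list]
      simp only [pref_a, pref_aa, List.drop]
      have hu : u.length ≤ n := by simp at hl; omega
      have hdu : (d :: u).length ≤ n := by simp at hl ⊢; omega
      by_cases hc : c = 'a'
      · subst hc
        by_cases hd : d = 'a'
        · subst hd
          simp [ih _ hdu, ih _ hu]
          by_cases hall : u.all (fun c => c == 'a')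
          · simp [altL, hall, fib_succ]
            ring
          · simp [altL, hall]
        · have hdf : ('a' == d) = false := by simpa using fun h => hd h.symm
          simp [hdf, ih _ hdu]
          have : ((d :: u).all (fun c => c == 'a')) = false := by
            simp [List.all, hd]
          simp [altL, this]
      · have hcf : ('a' == c) = false := by simpa using fun h => hc h.symm
        simp [hcf, altL, hc]

-- ===== VERDICT (by name: the statement is the Claim_ definition above) =====
theorem tal_spec : Claim_equal_tal := by
  intro s _
  show tal s = tal_alt s
  rw [tal, tal_alt, foldl_fibStep, key s.toList.length s.toList le_rfl, altL]
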